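-- pv_equiv track=rewrite | github.com/MrBrantCode/unitest_baseline | mut_generate/mist_train_cf/cf_92117/solution.py | is_palindrome_vowels
-- ===== SOURCE A (Python) =====
-- def is_palindrome_vowels(string):
--     # Convert the string to lowercase to handle case-insensitive comparison
--     string = string.lower()
--
--     # Check if the string is a palindrome
--     if string == string[::-1]:
--
--         # Check if all vowels are present in the string
--         vowels = ['a', 'e', 'i', 'o', 'u']
--         vowel_order = []
--         for char in string:
--             if char in vowels and char not in vowel_order:
--                 vowel_order.append(char)
--
--                 # Check if the vowels are in alphabetical order
--                 if vowel_order == sorted(vowel_order):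
--                     continue
--                 else:
--                     return False
--
--         # Check if all the vowels are present
--         if len(vowel_order) == len(vowels):
--             return True
--
--     return False
-- ===== SOURCE B (Python) =====
-- def is_palindrome_vowels(string):
--     s = string.lower()
--     if s != s[::-1]:
--         return False
--     a, e, i, o, u = (s.find(v) for v in "aeiou")
--     return 0 <= a < e < i < o < u
-- ===== Notes on version B (the rewrite author's own statement) =====
-- stated objective: alternative
-- what changed: A scans the string maintaining a growing vowel_order list that it re-sorts and compares at every new vowel; B instead computes the first-occurrence index s.find(v) of each of the five vowels once and returns palindrome && 0 <= find(a) < find(e) < find(i) < find(o) < find(u).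
import Mathlib
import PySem

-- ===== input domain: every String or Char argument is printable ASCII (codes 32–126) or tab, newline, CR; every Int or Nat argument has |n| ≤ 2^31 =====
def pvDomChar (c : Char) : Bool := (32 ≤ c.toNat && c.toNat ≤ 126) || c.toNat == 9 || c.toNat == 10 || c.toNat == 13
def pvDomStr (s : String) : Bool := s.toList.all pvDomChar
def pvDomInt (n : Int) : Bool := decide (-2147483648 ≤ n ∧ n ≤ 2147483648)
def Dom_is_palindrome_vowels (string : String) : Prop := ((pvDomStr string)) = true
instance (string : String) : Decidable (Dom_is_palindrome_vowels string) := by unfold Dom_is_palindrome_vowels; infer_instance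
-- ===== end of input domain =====

-- B replaces A's scan that maintains an incrementally re-sorted vowel_order list by the
-- first-occurrence positions s.find(v) of the five vowels compared in one chain (alternative
-- decomposition, same cost).


-- ===== PORT A =====
-- vowels = ['a', 'e', 'i', 'o', 'u']
def pvVowels : List Char := ['a', 'e', 'i', 'o', 'u']

-- A's for-loop over the characters, carrying vowel_order; the early 'return False' on an
-- unsorted vowel_order and the final 'len(vowel_order) == len(vowels)' check are literal.
def pvLoopA : List Char → List Char → Bool
  | [], vowel_order => vowel_order.length == 5
  | char :: rest, vowel_order =>
    if char ∈ pvVowels ∧ char ∉ vowel_order then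
      if vowel_order ++ [char] = PySem.List.sorted (vowel_order ++ [char]) (fun x => x) false then
        pvLoopA rest (vowel_order ++ [char])
      else false
    else pvLoopA rest vowel_order

def is_palindrome_vowels (string : String) : Bool :=
  let s := (PySem.Str.lower string).toList
  if some s = PySem.List.slice? s none none (-1) then   -- string == string[::-1]
    pvLoopA s []
  else
    false

-- ===== PORT B =====
def is_palindrome_vowels_alt (string : String) : Bool :=
  let s := (PySem.Str.lower string).toList
  if ¬ (some s = PySem.List.slice? s none none (-1)) then   -- s != s[::-1]
    false
  else
    let a := PySem.Chars.find s ['a']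
    let e := PySem.Chars.find s ['e']
    let i := PySem.Chars.find s ['i']
    let o := PySem.Chars.find s ['o']
    let u := PySem.Chars.find s ['u']
    decide (0 ≤ a ∧ a < e ∧ e < i ∧ i < o ∧ o < u)

-- ===== PRECONDITION & SPEC =====
def Spec_is_palindrome_vowels (string : String) (out : Bool) : Prop := out = is_palindrome_vowels_alt string
instance (string : String) (out : Bool) : Decidable (Spec_is_palindrome_vowels string out) := by unfold Spec_is_palindrome_vowels; infer_instance

-- ===== CLAIM (what is proved, stated in full; the proofs are below) =====
def Claim_equal_is_palindrome_vowels : Prop := ∀ (string : String), Dom_is_palindrome_vowels string → Spec_is_palindrome_vowels string (is_palindrome_vowels string)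

-- ===== LEMMAS AND PROOFS =====

-- The vowel_order list A's loop has accumulated when the scan ends (no early exit).
def pvF : List Char → List Char → List Char
  | [], vo => vo
  | c :: rest, vo => if c ∈ pvVowels ∧ c ∉ vo then pvF rest (vo ++ [c]) else pvF rest vo

-- How a first-occurrence index moves when one character is prepended to the string.
def pvShift (x : Int) : Int := if x = -1 then -1 else x + 1

-- B's chained comparison, generalized: the finds of the vowels in rem strictly increase, above prev.
def pvChain (s : List Char) : List Char → Int → Bool
  | [], _ => true
  | r :: rs, prev => decide (prev < PySem.Chars.find s [r]) && pvChain s rs (PySem.Chars.find s [r])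

lemma pv_find_cons (c : Char) (cs : List Char) (v : Char) :
    PySem.Chars.find (c :: cs) [v] = if c = v then 0 else pvShift (PySem.Chars.find cs [v]) := by
  by_cases hcv : c = v
  · subst hcv
    rw [if_pos rfl]
    have hmem : [c] <:+: (c :: cs) := (List.singleton_infix_iff c _).mpr List.mem_cons_self
    have h0 : 0 ≤ PySem.Chars.find (c :: cs) [c] := (PySem.Chars.find_nonneg_iff _ _).mpr hmem
    obtain ⟨hpre, hmin⟩ := PySem.Chars.find_spec h0
    by_contra hne
    have hpos : 0 < (PySem.Chars.find (c :: cs) [c]).toNat := by omega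
    exact hmin 0 hpos (by simpa using (⟨cs, rfl⟩ : [c] <+: c :: cs))
  · rw [if_neg hcv]
    by_cases hv : v ∈ cs
    · have hinf : [v] <:+: cs := (List.singleton_infix_iff _ _).mpr hv
      have h0 : 0 ≤ PySem.Chars.find cs [v] := (PySem.Chars.find_nonneg_iff _ _).mpr hinf
      obtain ⟨hpre, hmin⟩ := PySem.Chars.find_spec h0
      have h0' : 0 ≤ PySem.Chars.find (c :: cs) [v] :=
        (PySem.Chars.find_nonneg_iff _ _).mpr (List.infix_cons hinf)
      obtain ⟨hpre', hmin'⟩ := PySem.Chars.find_spec h0'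
      have hm0 : (PySem.Chars.find (c :: cs) [v]).toNat ≠ 0 := by
        intro h
        rw [h] at hpre'
        have hvc : v = c := by simpa using hpre'
        exact hcv hvc.symm
      have h1 : [v] <+: cs.drop ((PySem.Chars.find (c :: cs) [v]).toNat - 1) := by
        rw [← List.drop_succ_cons (l := cs) (a := c), Nat.sub_add_cancel (by omega)]
        exact hpre'
      have hk1 : (PySem.Chars.find cs [v]).toNat ≤ (PySem.Chars.find (c :: cs) [v]).toNat - 1 :=
        not_lt.mp (fun hlt => hmin _ hlt h1)
      have h2 : [v] <+: (c :: cs).drop ((PySem.Chars.find cs [v]).toNat + 1) := by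
        rw [List.drop_succ_cons]
        exact hpre
      have hk2 : (PySem.Chars.find (c :: cs) [v]).toNat ≤ (PySem.Chars.find cs [v]).toNat + 1 :=
        not_lt.mp (fun hlt => hmin' _ hlt h2)
      unfold pvShift
      rw [if_neg (by omega)]
      omega
    · have hn1 : PySem.Chars.find cs [v] = -1 :=
        (PySem.Chars.find_eq_neg_one_iff _ _).mpr
          (fun h => hv ((List.singleton_infix_iff _ _).mp h))
      have hn2 : PySem.Chars.find (c :: cs) [v] = -1 := by
        refine (PySem.Chars.find_eq_neg_one_iff _ _).mpr (fun h => ?_)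
        rcases List.mem_cons.mp ((List.singleton_infix_iff _ _).mp h) with h' | h'
        · exact hcv h'.symm
        · exact hv h'
      rw [hn1, hn2]
      rfl

lemma pv_sorted_iff (vo : List Char) :
    (vo = PySem.List.sorted vo (fun x => x) false) ↔ vo.Pairwise (· ≤ ·) := by
  constructor
  · intro h
    rw [h]
    simpa using PySem.List.sorted_pairwise vo (fun x => x)
  · intro h
    exact (PySem.List.sorted_eq_self_of_pairwise vo (fun x => x) h).symm

lemma pvF_structure (s : List Char) : ∀ vo, ∃ t, pvF s vo = vo ++ t ∧ ∀ x ∈ t, x ∈ pvVowels := by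
  induction s with
  | nil => exact fun vo => ⟨[], by simp [pvF]⟩
  | cons c rest ih =>
    intro vo
    by_cases hc : c ∈ pvVowels ∧ c ∉ vo
    · obtain ⟨t, ht, hmem⟩ := ih (vo ++ [c])
      exact ⟨c :: t, by simpa [pvF, hc] using ht, by
        intro x hx
        rcases List.mem_cons.mp hx with rfl | hx
        · exact hc.1
        · exact hmem x hx⟩
    · obtain ⟨t, ht, hmem⟩ := ih vo
      exact ⟨t, by simpa [pvF, hc] using ht, hmem⟩

lemma pvF_nodup (s : List Char) : ∀ vo, vo.Nodup → (pvF s vo).Nodup := by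
  induction s with
  | nil => exact fun vo h => by simpa [pvF] using h
  | cons c rest ih =>
    intro vo h
    by_cases hc : c ∈ pvVowels ∧ c ∉ vo
    · have h' : (vo ++ [c]).Nodup := by
        rw [List.nodup_append]
        refine ⟨h, List.nodup_singleton c, ?_⟩
        intro a ha b hb
        rw [List.mem_singleton] at hb
        subst hb
        exact fun h' => hc.2 (h' ▸ ha)
      simpa [pvF, hc] using ih (vo ++ [c]) h'
    · simpa [pvF, hc] using ih vo h

lemma pv_loopA_eq (s : List Char) : ∀ vo, vo.Pairwise (· ≤ ·) →
    pvLoopA s vo = (decide ((pvF s vo).Pairwise (· ≤ ·)) && ((pvF s vo).length == 5)) := by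
  induction s with
  | nil => intro vo h; simp [pvLoopA, pvF, h]
  | cons c rest ih =>
    intro vo h
    show (if c ∈ pvVowels ∧ c ∉ vo then _ else _) = _
    by_cases hc : c ∈ pvVowels ∧ c ∉ vo
    · rw [if_pos hc]
      have hF : pvF (c :: rest) vo = pvF rest (vo ++ [c]) := by
        simp [pvF, hc]
      rw [hF]
      by_cases hsort : (vo ++ [c]) = PySem.List.sorted (vo ++ [c]) (fun x => x) false
      · rw [if_pos hsort]
        exact ih (vo ++ [c]) ((pv_sorted_iff _).mp hsort)
      · rw [if_neg hsort]
        have h' : ¬ (vo ++ [c]).Pairwise (· ≤ ·) := fun hp => hsort ((pv_sorted_iff _).mpr hp)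
        have hFp : ¬ (pvF rest (vo ++ [c])).Pairwise (· ≤ ·) := by
          obtain ⟨t, ht, -⟩ := pvF_structure rest (vo ++ [c])
          intro hp
          rw [ht, List.pairwise_append] at hp
          exact h' hp.1
        simp [hFp]
    · rw [if_neg hc]
      have hF : pvF (c :: rest) vo = pvF rest vo := by simp [pvF, hc]
      rw [hF]
      exact ih vo h

-- the scan can never succeed once a vowel smaller than a recorded one is still missing
lemma pv_poisoned (s : List Char) (vo : List Char) (b : Char) (hnd : vo.Nodup)
    (hsub : ∀ x ∈ vo, x ∈ pvVowels) (hbv : b ∈ pvVowels) (hbo : b ∉ vo)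
    (hlt : ∃ a ∈ vo, b < a) :
    (decide ((pvF s vo).Pairwise (· ≤ ·)) && ((pvF s vo).length == 5)) = false := by
  cases hval : (decide ((pvF s vo).Pairwise (· ≤ ·)) && ((pvF s vo).length == 5)) with
  | false => rfl
  | true =>
    exfalso
    rw [Bool.and_eq_true, decide_eq_true_eq, beq_iff_eq] at hval
    obtain ⟨hpw, hlen⟩ := hval
    obtain ⟨t, ht, htv⟩ := pvF_structure s vo
    have hnd' := pvF_nodup s vo hnd
    have hsub' : pvF s vo ⊆ pvVowels := by
      rw [ht]
      intro x hx
      rcases List.mem_append.mp hx with hx | hx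
      · exact hsub x hx
      · exact htv x hx
    have hperm : (pvF s vo).Perm pvVowels :=
      List.Subperm.perm_of_length_le (List.subperm_of_subset hnd' hsub')
        (by simp [pvVowels, hlen])
    have hbF : b ∈ pvF s vo := hperm.mem_iff.mpr hbv
    rw [ht] at hbF
    rcases List.mem_append.mp hbF with hb | hb
    · exact hbo hb
    · obtain ⟨a, hav, hba⟩ := hlt
      have hle : a ≤ b := (List.pairwise_append.mp (ht ▸ hpw)).2.2 a hav b hb
      exact absurd hle (not_le.mpr hba)

lemma pv_chain_lt (s : List Char) : ∀ (rem : List Char) (p : Int),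
    pvChain s rem p = true → ∀ x ∈ rem, p < PySem.Chars.find s [x] := by
  intro rem
  induction rem with
  | nil => simp
  | cons r rs ih =>
    intro p h x hx
    simp only [pvChain, Bool.and_eq_true, decide_eq_true_eq] at h
    rcases List.mem_cons.mp hx with rfl | hx
    · exact h.1
    · exact lt_trans h.1 (ih _ h.2 x hx)

lemma pv_chain_skip_aux (c : Char) (cs : List Char) : ∀ (rem : List Char), c ∉ rem →
    ∀ (p q : Int), (∀ x : Int, -1 ≤ x → (p < pvShift x ↔ q < x)) →
    pvChain (c :: cs) rem p = pvChain cs rem q := by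
  intro rem
  induction rem with
  | nil => intros; rfl
  | cons r rs ih =>
    intro hnm p q hpq
    have hcr : c ≠ r := fun h => hnm (h ▸ List.mem_cons_self)
    have hf : PySem.Chars.find (c :: cs) [r] = pvShift (PySem.Chars.find cs [r]) := by
      rw [pv_find_cons, if_neg hcr]
    have hdec : decide (p < pvShift (PySem.Chars.find cs [r])) = decide (q < PySem.Chars.find cs [r]) :=
      decide_eq_decide.mpr (hpq _ (PySem.Chars.neg_one_le_find cs [r]))
    simp only [pvChain, hf, hdec]
    congr 1
    refine ih (fun h => hnm (List.mem_cons_of_mem r h)) _ _ ?_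
    intro x hx
    have hr := PySem.Chars.neg_one_le_find cs [r]
    unfold pvShift
    split_ifs <;> omega

lemma pvF_cons_pos {c : Char} {vo : List Char} (cs : List Char) (hc : c ∈ pvVowels ∧ c ∉ vo) :
    pvF (c :: cs) vo = pvF cs (vo ++ [c]) := by
  simp only [pvF]
  rw [if_pos hc]

lemma pvF_cons_neg {c : Char} {vo : List Char} (cs : List Char) (hc : ¬ (c ∈ pvVowels ∧ c ∉ vo)) :
    pvF (c :: cs) vo = pvF cs vo := by
  simp only [pvF]
  rw [if_neg hc]

lemma pv_chain_skip (c : Char) (cs rem : List Char) (hnm : c ∉ rem) :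
    pvChain (c :: cs) rem (-1) = pvChain cs rem (-1) :=
  pv_chain_skip_aux c cs rem hnm (-1) (-1) (by
    intro x hx
    unfold pvShift
    split_ifs <;> omega)

lemma pv_chain_head (c : Char) (cs rs : List Char) (hnm : c ∉ rs) :
    pvChain (c :: cs) (c :: rs) (-1) = pvChain cs rs (-1) := by
  simp only [pvChain]
  rw [pv_find_cons, if_pos rfl]
  rw [show decide ((-1 : Int) < 0) = true from by decide, Bool.true_and]
  exact pv_chain_skip_aux c cs rs hnm 0 (-1) (by
    intro x hx
    unfold pvShift
    split_ifs <;> omega)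

lemma pv_chain_dead (s : List Char) (r : Char) (rs : List Char) (c : Char) (hc : c ∈ rs)
    (h0 : PySem.Chars.find s [c] = 0) : pvChain s (r :: rs) (-1) = false := by
  cases hval : pvChain s (r :: rs) (-1) with
  | false => rfl
  | true =>
    exfalso
    simp only [pvChain, Bool.and_eq_true, decide_eq_true_eq] at hval
    have h2 := pv_chain_lt s rs _ hval.2 c hc
    have h1 := hval.1
    omega

lemma pv_head_case (cs : List Char) (c : Char) (k : Nat)
    (hc : c ∈ pvVowels ∧ c ∉ pvVowels.take k)
    (hsplit : pvVowels.drop k = c :: pvVowels.drop (k + 1))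
    (htake : pvVowels.take k ++ [c] = pvVowels.take (k + 1))
    (hnm : c ∉ pvVowels.drop (k + 1))
    (IH : (decide ((pvF cs (pvVowels.take (k + 1))).Pairwise (· ≤ ·)) &&
        ((pvF cs (pvVowels.take (k + 1))).length == 5)) = pvChain cs (pvVowels.drop (k + 1)) (-1)) :
    (decide ((pvF (c :: cs) (pvVowels.take k)).Pairwise (· ≤ ·)) &&
        ((pvF (c :: cs) (pvVowels.take k)).length == 5)) = pvChain (c :: cs) (pvVowels.drop k) (-1) := by
  rw [pvF_cons_pos cs hc, htake, IH, hsplit, pv_chain_head c cs _ hnm]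

lemma pv_dead_case (cs : List Char) (c b : Char) (k : Nat)
    (hc : c ∈ pvVowels ∧ c ∉ pvVowels.take k)
    (hnd : (pvVowels.take k ++ [c]).Nodup)
    (hsub : ∀ x ∈ pvVowels.take k ++ [c], x ∈ pvVowels)
    (hbv : b ∈ pvVowels) (hbo : b ∉ pvVowels.take k ++ [c]) (hba : b < c)
    (r : Char) (rs : List Char)
    (hsplit : pvVowels.drop k = r :: rs) (hcrs : c ∈ rs) :
    (decide ((pvF (c :: cs) (pvVowels.take k)).Pairwise (· ≤ ·)) &&
        ((pvF (c :: cs) (pvVowels.take k)).length == 5)) = pvChain (c :: cs) (pvVowels.drop k) (-1) := by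
  rw [pvF_cons_pos cs hc,
    pv_poisoned cs _ b hnd hsub hbv hbo ⟨c, by simp, hba⟩, hsplit,
    pv_chain_dead (c :: cs) r rs c hcrs (by rw [pv_find_cons, if_pos rfl])]

set_option maxRecDepth 4000 in
lemma pv_main (s : List Char) : ∀ k : Nat, k ≤ 5 →
    (decide ((pvF s (pvVowels.take k)).Pairwise (· ≤ ·)) && ((pvF s (pvVowels.take k)).length == 5))
      = pvChain s (pvVowels.drop k) (-1) := by
  induction s with
  | nil =>
    intro k hk
    interval_cases k <;> decide
  | cons c cs ih =>
    intro k hk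
    by_cases hm : c ∈ pvVowels.drop k
    · interval_cases k
      · fin_cases hm
        · exact pv_head_case cs 'a' 0 (by decide) (by decide) (by decide) (by decide) (ih 1 (by omega))
        · exact pv_dead_case cs 'e' 'a' 0 (by decide) (by decide) (by intro x hx; fin_cases hx <;> decide) (by decide) (by decide) (by decide) 'a' ['e','i','o','u'] (by decide) (by decide)
        · exact pv_dead_case cs 'i' 'a' 0 (by decide) (by decide) (by intro x hx; fin_cases hx <;> decide) (by decide) (by decide) (by decide) 'a' ['e','i','o','u'] (by decide) (by decide)
        · exact pv_dead_case cs 'o' 'a' 0 (by decide) (by decide) (by intro x hx; fin_cases hx <;> decide) (by decide) (by decide) (by decide) 'a' ['e','i','o','u'] (by decide) (by decide)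
        · exact pv_dead_case cs 'u' 'a' 0 (by decide) (by decide) (by intro x hx; fin_cases hx <;> decide) (by decide) (by decide) (by decide) 'a' ['e','i','o','u'] (by decide) (by decide)
      · fin_cases hm
        · exact pv_head_case cs 'e' 1 (by decide) (by decide) (by decide) (by decide) (ih 2 (by omega))
        · exact pv_dead_case cs 'i' 'e' 1 (by decide) (by decide) (by intro x hx; fin_cases hx <;> decide) (by decide) (by decide) (by decide) 'e' ['i','o','u'] (by decide) (by decide)
        · exact pv_dead_case cs 'o' 'e' 1 (by decide) (by decide) (by intro x hx; fin_cases hx <;> decide) (by decide) (by decide) (by decide) 'e' ['i','o','u'] (by decide) (by decide)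
        · exact pv_dead_case cs 'u' 'e' 1 (by decide) (by decide) (by intro x hx; fin_cases hx <;> decide) (by decide) (by decide) (by decide) 'e' ['i','o','u'] (by decide) (by decide)
      · fin_cases hm
        · exact pv_head_case cs 'i' 2 (by decide) (by decide) (by decide) (by decide) (ih 3 (by omega))
        · exact pv_dead_case cs 'o' 'i' 2 (by decide) (by decide) (by intro x hx; fin_cases hx <;> decide) (by decide) (by decide) (by decide) 'i' ['o','u'] (by decide) (by decide)
        · exact pv_dead_case cs 'u' 'i' 2 (by decide) (by decide) (by intro x hx; fin_cases hx <;> decide) (by decide) (by decide) (by decide) 'i' ['o','u'] (by decide) (by decide)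
      · fin_cases hm
        · exact pv_head_case cs 'o' 3 (by decide) (by decide) (by decide) (by decide) (ih 4 (by omega))
        · exact pv_dead_case cs 'u' 'o' 3 (by decide) (by decide) (by intro x hx; fin_cases hx <;> decide) (by decide) (by decide) (by decide) 'o' ['u'] (by decide) (by decide)
      · fin_cases hm
        · exact pv_head_case cs 'u' 4 (by decide) (by decide) (by decide) (by decide) (ih 5 (by omega))
      · simp [pvVowels] at hm
    · have hcneg : ¬ (c ∈ pvVowels ∧ c ∉ pvVowels.take k) := by
        rintro ⟨h1, h2⟩
        have hsplit : c ∈ pvVowels.take k ++ pvVowels.drop k := by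
          rw [List.take_append_drop]
          exact h1
        rcases List.mem_append.mp hsplit with h | h
        · exact h2 h
        · exact hm h
      rw [pvF_cons_neg cs hcneg, ih k hk, pv_chain_skip c cs _ hm]

-- ===== VERDICT (by name: the statement is the Claim_ definition above) =====
theorem is_palindrome_vowels_spec : Claim_equal_is_palindrome_vowels := by
  intro string _
  unfold Spec_is_palindrome_vowels is_palindrome_vowels is_palindrome_vowels_alt
  simp only [PySem.List.slice?_none_none_neg_one]
  set s := (PySem.Str.lower string).toList with hs
  by_cases hp : some s = some s.reverse
  · rw [if_pos hp, if_neg (by simp [hp])]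
    have h1 := pv_loopA_eq s [] (List.Pairwise.nil)
    have h2 := pv_main s 0 (by omega)
    simp only [List.take_zero, List.drop_zero] at h2
    rw [h1]
    refine h2.trans ?_
    show pvChain s pvVowels (-1) = _
    simp only [pvChain, pvVowels, Bool.and_true]
    rw [Bool.eq_iff_iff]
    simp only [Bool.and_eq_true, decide_eq_true_eq]
    omega
  · rw [if_neg hp, if_pos (by simp [hp])]
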